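-- pv_equiv track=rewrite | github.com/dmi3ev1987/CodeWars | 7-kyu/red-knight/red-knight.py | red_knight
-- ===== SOURCE A (Python) =====
-- def red_knight(v_pos, pown):
--     knight = 0
--     while knight != pown:
--         pown += 1
--         knight += 2
--         v_pos = 1 if v_pos == 0 else 0
--     color = 'White' if v_pos == 0 else 'Black'
--     return (color, knight)
-- ===== SOURCE B (Python) =====
-- def red_knight(v_pos, pown):
--     color = 'White' if (v_pos == 0) == (pown % 2 == 0) else 'Black'
--     return (color, 2 * pown)
-- ===== Notes on version B (the rewrite author's own statement) =====
-- stated objective: faster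
-- what changed: Replaces the O(pown) simulation loop with a closed form: knight = 2*pown and the color read off the parity of pown combined with whether v_pos is 0.
import Mathlib
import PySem

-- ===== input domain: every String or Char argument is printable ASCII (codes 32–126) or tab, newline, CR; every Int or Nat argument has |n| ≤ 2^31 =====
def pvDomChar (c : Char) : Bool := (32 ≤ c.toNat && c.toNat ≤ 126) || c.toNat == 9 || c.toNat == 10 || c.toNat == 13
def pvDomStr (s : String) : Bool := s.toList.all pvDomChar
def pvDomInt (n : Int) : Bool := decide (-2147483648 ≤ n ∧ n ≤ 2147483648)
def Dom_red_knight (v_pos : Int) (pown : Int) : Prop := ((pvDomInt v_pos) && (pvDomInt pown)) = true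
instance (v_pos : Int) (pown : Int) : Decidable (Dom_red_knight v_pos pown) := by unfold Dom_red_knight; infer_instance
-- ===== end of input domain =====

-- B replaces A's O(pown) counting loop with the closed form knight = 2*pown and a parity test for the color (faster, asymptotic).


-- ===== PORT A =====
-- A's while-loop: each iteration does pown += 1; knight += 2; v_pos flips (1 if 0 else 0).
-- The fuel argument only makes the recursion total; inside Pre_ (0 ≤ pown) the fuel
-- pown.toNat + 1 is enough for the loop to stop at its own knight = pown test, as in Python.
def redLoop (v_pos : Int) (knight : Int) (pown : Int) : Nat → Int × Int
  | 0 => (v_pos, knight)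
  | Nat.succ f =>
      if knight = pown then (v_pos, knight)
      else redLoop (if v_pos = 0 then 1 else 0) (knight + 2) (pown + 1) f

def red_knight (v_pos : Int) (pown : Int) : String × Int :=
  let r := redLoop v_pos 0 pown (pown.toNat + 1)
  ((if r.1 = 0 then "White" else "Black"), r.2)

-- ===== PORT B =====
def red_knight_alt (v_pos : Int) (pown : Int) : String × Int :=
  ((if (decide (v_pos = 0)) = (decide (pown % 2 = 0)) then "White" else "Black"), 2 * pown)

-- ===== PRECONDITION & SPEC =====
-- Pre_ excludes pown < 0, on which A's while-loop never terminates (no value is returned).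
def Pre_red_knight (_v_pos : Int) (pown : Int) : Prop := 0 ≤ pown
instance (v_pos : Int) (pown : Int) : Decidable (Pre_red_knight v_pos pown) := by unfold Pre_red_knight; infer_instance
def pvWitness_red_knight : Int × Int := (0, 3)

def Spec_red_knight (v_pos : Int) (pown : Int) (out : String × Int) : Prop := out = red_knight_alt v_pos pown
instance (v_pos : Int) (pown : Int) (out : String × Int) : Decidable (Spec_red_knight v_pos pown out) := by unfold Spec_red_knight; infer_instance

-- ===== CLAIM (what is proved, stated in full; the proofs are below) =====
def Claim_equal_red_knight : Prop := ∀ (v_pos : Int) (pown : Int), Dom_red_knight v_pos pown → Pre_red_knight v_pos pown → Spec_red_knight v_pos pown (red_knight v_pos pown)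

-- ===== LEMMAS AND PROOFS =====

theorem redLoop_succ (v k p : Int) (f : Nat) (h : k ≠ p) :
    redLoop v k p (f + 1) = redLoop (if v = 0 then 1 else 0) (k + 2) (p + 1) f := by
  rw [redLoop, if_neg h]

/-- Loop characterisation: with gap `n` between `pown` and `knight` and fuel `n + 1`,
the loop runs `n` times, returning `knight + 2n`, and the final `v_pos` is zero
iff `(v = 0) ↔ (n even)`. -/
theorem redLoop_eq (n : Nat) : ∀ (v k : Int),
    (redLoop v k (k + n) (n + 1)).2 = k + 2 * n ∧
      ((redLoop v k (k + n) (n + 1)).1 = 0 ↔ ((v = 0) ↔ ((n : Int) % 2 = 0))) := by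
  induction n with
  | zero =>
      intro v k
      simp [redLoop]
  | succ m ih =>
      intro v k
      have hne : k ≠ k + ((m : Int) + 1) := by omega
      have hstep : (k : Int) + (↑m + 1) + 1 = (k + 2) + ↑m := by ring
      rw [show ((m : Int) + 1 : Int) = ((m + 1 : Nat) : Int) by push_cast; ring] at hne
      rw [redLoop_succ _ _ _ _ hne]
      push_cast
      rw [hstep]
      obtain ⟨h2, h1⟩ := ih (if v = 0 then 1 else 0) (k + 2)
      refine ⟨by rw [h2]; ring, ?_⟩
      rw [h1]
      by_cases hv : v = 0 <;> simp [hv] <;> omega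

-- ===== VERDICT (by name: the statement is the Claim_ definition above) =====
theorem red_knight_spec : Claim_equal_red_knight := by
  intro v_pos pown _ hpre
  unfold Pre_red_knight at hpre
  unfold Spec_red_knight red_knight red_knight_alt
  obtain ⟨n, hp⟩ : ∃ n : Nat, pown = (n : Int) := ⟨pown.toNat, by omega⟩
  subst hp
  obtain ⟨h2, h1⟩ := redLoop_eq n v_pos 0
  simp only [zero_add] at h2 h1
  simp only [Int.toNat_natCast, Prod.mk.injEq]
  refine ⟨?_, by omega⟩
  by_cases hc : v_pos = 0 ↔ ((n : Int)) % 2 = 0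
  · rw [if_pos (h1.mpr hc), if_pos (by simp only [decide_eq_decide]; exact hc)]
  · rw [if_neg (fun h => hc (h1.mp h)), if_neg (by simp only [decide_eq_decide]; exact hc)]
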